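-- pv_equiv track=rewrite | github.com/anuragdogra2192/Data_structures_with_python3 | OptimizingBoxWeights.py | OptimizingBoxWeights
-- ===== SOURCE A (Python) =====
-- def OptimizingBoxWeights(arr, n):
--     arr.sort(reverse=True)
--     set_B = []
--     sum_A = sum(arr)
--     sum_B = 0
--     i = len(arr) - 1
--     while((sum_A > sum_B) and i>-1):
--         sum_A = sum_A - arr[i]
--         sum_B += arr[i]
--         if sum_B < sum_A:
--             set_B.append(arr.pop())
--         i -= 1
--     arr.sort()
--     return arr
-- ===== SOURCE B (Python) =====
-- def OptimizingBoxWeights(arr, n):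
--     # Sort ascending once, count how many lightest boxes stay on the light side
--     # with a single prefix walk, then delete that prefix in one bulk slice.
--     arr.sort()
--     total = sum(arr)
--     light = 0
--     cut = 0
--     if total > 0:
--         for x in arr:
--             if 2 * (light + x) >= total:
--                 break
--             light += x
--             cut += 1
--     del arr[:cut]
--     return arr
-- ===== Notes on version B (the rewrite author's own statement) =====
-- stated objective: simpler
-- what changed: A pops the lightest boxes one by one from the tail of a descending sort while tracking two running sums and an index, then re-sorts; B sorts ascending once, counts the cut point with a single prefix walk against 2*(light+x) < total, and deletes that prefix in one bulk slice with no pops, no second sort and no index bookkeeping.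
import Mathlib
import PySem

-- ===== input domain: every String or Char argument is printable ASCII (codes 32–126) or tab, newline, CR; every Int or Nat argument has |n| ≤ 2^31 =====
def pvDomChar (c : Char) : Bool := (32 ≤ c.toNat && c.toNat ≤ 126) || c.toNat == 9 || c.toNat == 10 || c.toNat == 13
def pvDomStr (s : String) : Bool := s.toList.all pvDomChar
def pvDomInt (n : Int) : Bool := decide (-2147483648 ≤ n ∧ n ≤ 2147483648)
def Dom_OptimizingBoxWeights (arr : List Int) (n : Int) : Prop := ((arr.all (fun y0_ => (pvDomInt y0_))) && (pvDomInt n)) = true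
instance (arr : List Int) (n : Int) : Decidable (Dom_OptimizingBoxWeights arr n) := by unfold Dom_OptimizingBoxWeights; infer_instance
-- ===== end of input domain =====

-- B replaces A's index-tracked dual-sum loop with pops on the descending list by a
-- single prefix walk over the ascending sort plus one bulk prefix deletion (objective:
-- simpler).  A mutates `arr` in place (sort + pops); B performs the equivalent in-place
-- mutation (sort + del of a prefix), leaving the argument in the same final state.

-- ===== PORT A =====
-- the while loop of A: state (arr, sum_A, sum_B, i); fuel = i+1 at entry, enough since
-- i decreases by 1 every iteration and the loop requires i > -1
def pvALoop (arr : List Int) (sumA sumB : Int) (i : Int) : Nat → List Int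
  | 0 => arr
  | fuel + 1 =>
    if sumA > sumB ∧ i > -1 then
      match PySem.List.pyGet? arr i with
      | none => arr   -- IndexError: unreachable from A's entry state
      | some x =>
        if sumB + x < sumA - x then
          match PySem.List.pop? arr with
          | none => arr   -- pop from empty: unreachable
          | some (_, arr') => pvALoop arr' (sumA - x) (sumB + x) (i - 1) fuel
        else pvALoop arr (sumA - x) (sumB + x) (i - 1) fuel
    else arr

def OptimizingBoxWeights (arr : List Int) (n : Int) : List Int :=
  let a := PySem.List.sorted arr (fun x => x) true
  let sumA := a.sum
  let i : Int := (a.length : Int) - 1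
  let a' := pvALoop a sumA 0 i (i + 1).toNat
  PySem.List.sorted a' (fun x => x)

-- ===== PORT B =====
-- the for loop of Source B: walk the ascending list accumulating light and cut, break on
-- the first element whose move would reach half the total
def pvBLoop (t : List Int) (total light : Int) (cut : Nat) : Nat :=
  match t with
  | [] => cut
  | x :: xs => if 2 * (light + x) ≥ total then cut else pvBLoop xs total (light + x) (cut + 1)

def OptimizingBoxWeights_alt (arr : List Int) (n : Int) : List Int :=
  let a := PySem.List.sorted arr (fun x => x)
  let total := a.sum
  let cut := if total > 0 then pvBLoop a total 0 0 else 0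
  a.drop cut

-- ===== PRECONDITION & SPEC =====
def Spec_OptimizingBoxWeights (arr : List Int) (n : Int) (out : List Int) : Prop := out = OptimizingBoxWeights_alt arr n
instance (arr : List Int) (n : Int) (out : List Int) : Decidable (Spec_OptimizingBoxWeights arr n out) := by unfold Spec_OptimizingBoxWeights; infer_instance

-- ===== CLAIM (what is proved, stated in full; the proofs are below) =====
def Claim_equal_OptimizingBoxWeights : Prop := ∀ (arr : List Int) (n : Int), Dom_OptimizingBoxWeights arr n → Spec_OptimizingBoxWeights arr n (OptimizingBoxWeights arr n)

-- ===== LEMMAS AND PROOFS =====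

-- reverse=True sort of ints is the reverse of the ascending sort
lemma sorted_rev_eq_reverse (xs : List Int) :
    PySem.List.sorted xs (fun x => x) true = (PySem.List.sorted xs (fun x => x)).reverse := by
  apply List.Perm.eq_of_pairwise (le := fun a b => b ≤ a)
  · intro a b _ _ h1 h2; omega
  · exact PySem.List.sorted_pairwise_rev xs (fun x => x)
  · exact (List.pairwise_reverse).2 (PySem.List.sorted_pairwise xs (fun x => x))
  · exact (PySem.List.sorted_perm xs (fun x => x) true).trans
      ((PySem.List.sorted_perm xs (fun x => x) false).symm.trans
        (List.reverse_perm _).symm)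

-- sorting an already-descending list yields its reverse
lemma sorted_of_reverse_pairwise (ys : List Int) (h : List.Pairwise (fun a b => a ≤ b) ys) :
    PySem.List.sorted ys.reverse (fun x => x) = ys :=
  PySem.List.sorted_id_eq_of_perm_of_pairwise ys.reverse ys (List.reverse_perm ys).symm h

-- A's loop returns immediately when the guard fails
lemma pvALoop_stop (arr : List Int) (sumA sumB i : Int) (fuel : Nat) (h : ¬ sumA > sumB) :
    pvALoop arr sumA sumB i fuel = arr := by
  cases fuel <;> simp [pvALoop, h]

-- B's cut counter is an accumulator
lemma pvBLoop_acc (t : List Int) (total light : Int) (c : Nat) :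
    pvBLoop t total light c = pvBLoop t total light 0 + c := by
  induction t generalizing light c with
  | nil => simp [pvBLoop]
  | cons x xs ih =>
    simp only [pvBLoop]
    split
    · simp
    · rw [ih (light + x) (c + 1), ih (light + x) 1]; omega

-- invariant relation: A's loop on the reversed suffix equals a bulk drop by B's count
lemma pvALoop_eq_drop (t : List Int) (light : Int) (fuel : Nat)
    (hf : t.length ≤ fuel) (hg : light < t.sum) :
    pvALoop t.reverse t.sum light ((t.length : Int) - 1) fuel
      = (t.drop (pvBLoop t (light + t.sum) light 0)).reverse := by
  induction t generalizing light fuel with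
  | nil => cases fuel <;> simp [pvALoop]
  | cons x xs ih =>
    cases fuel with
    | zero => simp at hf
    | succ f =>
      have hx : (x :: xs).sum = x + xs.sum := by simp
      have hg' : light < x + xs.sum := hx ▸ hg
      have hlen1 : ((x :: xs).length : Int) - 1 = ((xs.length : Nat) : Int) := by
        simp
      have hget : PySem.List.pyGet? (x :: xs).reverse ((xs.length : Nat) : Int) = some x := by
        simp [PySem.List.pyGet?, PySem.List.pyIdx?]
      simp only [pvALoop, hx, hlen1]
      rw [show light + (x + xs.sum) = light + x + xs.sum from by ring]
      rw [if_pos ⟨by omega, by omega⟩, hget]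
      simp only []
      by_cases hc : light + x < xs.sum
      · -- popped: sum_B stays below sum_A, recurse on xs
        rw [if_pos (by omega)]
        have hpop : PySem.List.pop? (x :: xs).reverse = some (x, xs.reverse) := by
          rw [show (x :: xs).reverse = xs.reverse ++ [x] by simp]
          exact PySem.List.pop?_last xs.reverse x
        rw [hpop]
        simp only []
        rw [show x + xs.sum - x = xs.sum from by ring]
        rw [ih (light + x) f (by simpa using hf) hc]
        simp only [pvBLoop]
        rw [if_neg (by omega), pvBLoop_acc xs (light + x + xs.sum) (light + x) 1]
        simp
      · -- not popped: the next guard fails, loop ends with arr unchanged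
        rw [if_neg (by omega)]
        rw [pvALoop_stop _ _ _ _ _ (by omega)]
        simp only [pvBLoop]
        rw [if_pos (by omega)]
        simp

-- ===== VERDICT (by name: the statement is the Claim_ definition above) =====
theorem OptimizingBoxWeights_spec : Claim_equal_OptimizingBoxWeights := by
  intro arr n _
  unfold Spec_OptimizingBoxWeights OptimizingBoxWeights OptimizingBoxWeights_alt
  simp only [sorted_rev_eq_reverse]
  set a := PySem.List.sorted arr (fun x => x) with ha
  have hpw : List.Pairwise (fun p q => p ≤ q) a := PySem.List.sorted_pairwise arr (fun x => x)
  have hsum : a.reverse.sum = a.sum := by simp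
  have hlen : a.reverse.length = a.length := by simp
  simp only [List.length_reverse, List.sum_reverse]
  by_cases hpos : a.sum > 0
  · rw [show (((a.length : Int) - 1) + 1).toNat = a.length by omega]
    rw [pvALoop_eq_drop a 0 a.length (le_refl _) (by omega)]
    rw [if_pos hpos, zero_add]
    exact sorted_of_reverse_pairwise _ (hpw.drop)
  · rw [pvALoop_stop _ _ _ _ _ (by omega), if_neg hpos]
    simpa using sorted_of_reverse_pairwise a hpw
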